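-- pv_equiv track=rewrite | github.com/calpoly-csai/swanton | stream_deepspeech.py | get_consecutive_variations
-- ===== SOURCE A (Python) =====
-- def get_consecutive_variations(string):
--     variations = []
--     array = string.split()
--     for i in range(len(array)): #loop through every substring
--         end = len(array[i + 1:len(array)]) #number of substrings from the current substring to the last substring
--         string = array[i]  #initialize the string to be the current word
--         pos = i + 1 #next string position
--         variations.append(string) #append the first word
--         while end > 0:
--             new = string + " " + array[pos] #combine the string with the next substring
--             variations.append(new) #append it as a variation
--             string = new #set the string as the newly combined string
--             pos += 1 #set the position to be the next substring
--             end -= 1 #subtract the number of substrings left to account for by 1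
--     return variations
-- ===== SOURCE B (Python) =====
-- def get_consecutive_variations(string):
--     variations = []
--     array = string.split()
--     n = len(array)
--     for i in range(n):
--         for j in range(i, n):
--             variations.append(" ".join(array[i:j+1]))
--     return variations
-- ===== Notes on version B (the rewrite author's own statement) =====
-- stated objective: simpler
-- what changed: Replaces A's threaded string accumulator with pos/end counters by two plain index loops that build each variation directly as a space-join of the slice array[i:j+1] of the original word list.
import Mathlib
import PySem

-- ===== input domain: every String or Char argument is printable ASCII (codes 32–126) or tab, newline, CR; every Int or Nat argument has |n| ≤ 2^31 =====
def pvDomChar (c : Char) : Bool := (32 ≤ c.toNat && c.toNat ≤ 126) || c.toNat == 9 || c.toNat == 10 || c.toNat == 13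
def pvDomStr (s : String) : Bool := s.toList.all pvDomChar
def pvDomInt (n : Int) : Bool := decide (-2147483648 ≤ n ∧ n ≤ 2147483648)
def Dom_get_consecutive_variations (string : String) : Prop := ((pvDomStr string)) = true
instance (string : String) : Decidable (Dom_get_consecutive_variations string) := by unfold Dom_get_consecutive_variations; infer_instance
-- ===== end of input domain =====

-- B replaces A's threaded accumulator/pos/end bookkeeping with two index loops joining a fresh slice; same values, same cost (objective: simpler).

-- ===== PORT A =====
-- the while loop: state (variations, string, pos, end); `end` is the fuel
def pvInnerA (array : List String) (variations : List String) (s : String) (pos : Int) : Nat → List String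
  | 0 => variations
  | e + 1 =>
    let new := s ++ " " ++ PySem.List.pyGetD array pos ""
    pvInnerA array (variations ++ [new]) new (pos + 1) e

def get_consecutive_variations (string : String) : List String :=
  let array := PySem.Str.split₀ string
  (PySem.List.pyRange 0 (array.length) 1).foldl
    (fun variations i =>
      let endc := (PySem.List.slice array (some (i + 1)) (some (array.length : Int))).length
      let s := PySem.List.pyGetD array i ""
      pvInnerA array (variations ++ [s]) s (i + 1) endc)
    []

-- ===== PORT B =====
def get_consecutive_variations_alt (string : String) : List String :=
  let array := PySem.Str.split₀ string
  (PySem.List.pyRange 0 (array.length) 1).foldl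
    (fun variations i =>
      (PySem.List.pyRange i (array.length) 1).foldl
        (fun variations j =>
          variations ++ [PySem.Str.join " " (PySem.List.slice array (some i) (some (j + 1)))])
        variations)
    []

-- ===== PRECONDITION & SPEC =====
def Spec_get_consecutive_variations (string : String) (out : List String) : Prop := out = get_consecutive_variations_alt string
instance (string : String) (out : List String) : Decidable (Spec_get_consecutive_variations string out) := by unfold Spec_get_consecutive_variations; infer_instance

-- ===== CLAIM (what is proved, stated in full; the proofs are below) =====
def Claim_equal_get_consecutive_variations : Prop := ∀ (string : String), Dom_get_consecutive_variations string → Spec_get_consecutive_variations string (get_consecutive_variations string)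


-- ===== LEMMAS AND PROOFS =====

-- joining with a separator, peeled one element at a time (String level)
lemma strJoin_cons_cons (sep x y : String) (rest : List String) :
    PySem.Str.join sep (x :: y :: rest) = x ++ sep ++ PySem.Str.join sep (y :: rest) := by
  apply String.toList_injective
  simp [PySem.Str.toList_join, PySem.Chars.join_cons_cons]

-- join of the first word alone
lemma join_take_one (array : List String) (p : Nat) (hp : p < array.length) :
    PySem.Str.join " " ((array.drop p).take 1) = array.getD p "" := by
  rw [List.drop_eq_getElem_cons hp, List.take_succ_cons, List.take_zero,
    List.getD_eq_getElem _ _ hp]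
  simp [PySem.Str.join, PySem.Chars.join_singleton]

-- peeling the first word off a joined segment
lemma join_take_succ (array : List String) (p k : Nat) (h : p + k + 2 <= array.length) :
    PySem.Str.join " " ((array.drop p).take (k + 2)) =
      array.getD p "" ++ " " ++ PySem.Str.join " " ((array.drop (p + 1)).take (k + 1)) := by
  have hp : p < array.length := by omega
  rw [List.drop_eq_getElem_cons hp, List.take_succ_cons]
  have hne : (array.drop (p + 1)).take (k + 1) ≠ [] := by
    have hlen : ((array.drop (p + 1)).take (k + 1)).length = min (k + 1) (array.length - (p + 1)) := by
      simp
    intro h0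
    rw [h0] at hlen
    simp at hlen
    omega
  obtain ⟨y, rest, hyr⟩ := List.exists_cons_of_ne_nil hne
  rw [hyr, strJoin_cons_cons, List.getD_eq_getElem _ _ hp]

-- the accumulator only grows at the end
lemma pvInnerA_acc (array : List String) : ∀ (e : Nat) (vars : List String) (s : String) (pos : Int),
    pvInnerA array vars s pos e = vars ++ pvInnerA array [] s pos e := by
  intro e
  induction e with
  | zero => intro vars s pos; simp [pvInnerA]
  | succ e ih =>
    intro vars s pos
    rw [pvInnerA, pvInnerA, ih, ih ([] ++ _)]
    simp

-- what the while loop produces, as joins of segments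
lemma pvInnerA_spec (array : List String) : ∀ (e p : Nat) (s : String), p + e <= array.length →
    pvInnerA array [] s (p : Int) e =
      (List.range e).map (fun k => s ++ " " ++ PySem.Str.join " " ((array.drop p).take (k + 1))) := by
  intro e
  induction e with
  | zero => intro p s _; simp [pvInnerA]
  | succ e ih =>
    intro p s h
    have hp : p < array.length := by omega
    rw [pvInnerA, pvInnerA_acc]
    have hcast : (p : Int) + 1 = ((p + 1 : Nat) : Int) := by push_cast; ring
    rw [hcast, ih (p + 1) _ (by omega)]
    rw [List.range_succ_eq_map, List.map_cons, List.map_map]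
    rw [PySem.List.pyGetD_natCast]
    simp only [List.nil_append, List.cons_append]
    congr 1
    · simp [join_take_one array p hp]
    · apply List.map_congr_left
      intro k hk
      have hk' : k < e := List.mem_range.mp hk
      simp only [Function.comp_apply]
      rw [show k.succ + 1 = k + 2 from rfl, join_take_succ array p k (by omega)]
      simp [String.append_assoc]

-- append-only fold is an append of a map
lemma foldl_append_map {α β : Type} (f : α → β) : ∀ (l : List α) (acc : List β),
    l.foldl (fun acc x => acc ++ [f x]) acc = acc ++ l.map f := by
  intro l
  induction l with
  | nil => intro acc; simp
  | cons x t ih => intro acc; simp [List.foldl, ih]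

-- the per-start-index chunk produced by A equals B's chunk of fresh joins
lemma chunk_eq (array : List String) (i : Nat) (hi : i < array.length) :
    array.getD i "" ::
      (List.range (array.length - i - 1)).map
        (fun k => array.getD i "" ++ " " ++ PySem.Str.join " " ((array.drop (i + 1)).take (k + 1)))
    = (List.range (array.length - i)).map
        (fun k => PySem.Str.join " " ((array.drop i).take (k + 1))) := by
  have hn : array.length - i = (array.length - i - 1) + 1 := by omega
  rw [hn, List.range_succ_eq_map, List.map_cons, List.map_map]
  congr 1
  · rw [join_take_one array i hi]
  · apply List.map_congr_left
    intro k hk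
    have hk' : k < array.length - i - 1 := List.mem_range.mp hk
    simp only [Function.comp]
    rw [show k.succ + 1 = k + 2 from rfl, join_take_succ array i k (by omega)]

-- ===== VERDICT (by name: the statement is the Claim_ definition above) =====
theorem get_consecutive_variations_spec : Claim_equal_get_consecutive_variations := by
  intro string _
  unfold Spec_get_consecutive_variations get_consecutive_variations get_consecutive_variations_alt
  apply PySem.List.foldl_congr_mem
  intro acc i hi
  obtain ⟨h0, hlt⟩ := PySem.List.mem_pyRange_one.mp hi
  set array := PySem.Str.split₀ string with harr
  obtain ⟨iN, rfl⟩ : ∃ iN : Nat, i = (iN : Int) := ⟨i.toNat, (Int.toNat_of_nonneg h0).symm⟩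
  have hiN : iN < array.length := by exact_mod_cast hlt
  -- A side
  have hcast1 : (iN : Int) + 1 = ((iN + 1 : Nat) : Int) := by push_cast; ring
  have hend : (PySem.List.slice array (some ((iN : Int) + 1)) (some (array.length : Int))).length
      = array.length - iN - 1 := by
    rw [hcast1, PySem.List.length_slice, PySem.List.clampIdx_natCast, PySem.List.clampIdx_natCast]
    omega
  rw [hend, PySem.List.pyGetD_natCast, pvInnerA_acc, hcast1,
    pvInnerA_spec array (array.length - iN - 1) (iN + 1) _ (by omega)]
  -- B side
  rw [foldl_append_map (fun j => PySem.Str.join " " (PySem.List.slice array (some (iN : Int)) (some (j + 1))))]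
  rw [PySem.List.pyRange_one, List.map_map]
  have h1 : ((array.length : Int) - (iN : Int)).toNat = array.length - iN := by omega
  rw [h1]
  have h2 : ∀ k : Nat,
      PySem.List.slice array (some (iN : Int)) (some ((iN : Int) + (k : Int) + 1))
        = (array.drop iN).take (k + 1) := by
    intro k
    have : (iN : Int) + (k : Int) + 1 = (iN : Int) + ((k + 1 : Nat) : Int) := by push_cast; ring
    rw [this, PySem.List.slice_natCast_add]
  simp only [Function.comp_def, h2]
  rw [← chunk_eq array iN hiN]
  simp
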